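-- pv_equiv track=rewrite | github.com/radu2lupu/total-recall | scripts/evaluate_agent_gauntlet_suite.py | parse_raw_blocks
-- ===== SOURCE A (Python) =====
-- from typing import Dict, List, Optional, Sequence, Tuple
--
-- def parse_raw_blocks(raw_memory: str) -> Dict[str, str]:
--     blocks: Dict[str, str] = {}
--     current: List[str] = []
--     for line in raw_memory.splitlines():
--         if line.startswith("qmd://") and current:
--             blocks[current[0].strip()] = "\n".join(current).strip()
--             current = []
--         if line.strip() or current:
--             current.append(line)
--     if current:
--         blocks[current[0].strip()] = "\n".join(current).strip()
--     return blocks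
-- ===== SOURCE B (Python) =====
-- def parse_raw_blocks(raw_memory: str) -> dict:
--     lines = raw_memory.splitlines()
--     start = next((i for i, ln in enumerate(lines) if ln.strip()), None)
--     if start is None:
--         return {}
--     n = len(lines)
--     bounds = [start] + [j for j in range(start + 1, n) if lines[j].startswith("qmd://")] + [n]
--     segments = [lines[a:b] for a, b in zip(bounds, bounds[1:])]
--     return {seg[0].strip(): "\n".join(seg).strip() for seg in segments}
-- ===== Notes on version B (the rewrite author's own statement) =====
-- stated objective: alternative
-- what changed: Replaces A's incremental flush-on-boundary state machine (dict + current buffer mutated per line) with a locate-then-partition decomposition: find the first non-blank line, collect all qmd:// boundary indices, slice the line list into segments at those indices, and build the dict from the segments in one comprehension.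
import Mathlib
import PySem

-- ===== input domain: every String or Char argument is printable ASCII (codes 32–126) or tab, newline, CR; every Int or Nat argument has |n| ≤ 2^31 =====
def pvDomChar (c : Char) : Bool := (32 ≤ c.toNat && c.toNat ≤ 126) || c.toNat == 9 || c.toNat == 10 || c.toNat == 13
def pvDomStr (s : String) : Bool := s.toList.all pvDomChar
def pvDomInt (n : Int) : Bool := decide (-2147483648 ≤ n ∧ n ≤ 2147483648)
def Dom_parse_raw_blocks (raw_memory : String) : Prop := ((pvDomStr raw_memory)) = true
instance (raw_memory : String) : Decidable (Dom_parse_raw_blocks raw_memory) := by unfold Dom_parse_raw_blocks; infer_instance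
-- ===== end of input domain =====

-- B replaces A's per-line flush-on-boundary state machine by locate-boundaries-then-partition
-- (find first non-blank line, collect qmd:// boundary indices, slice into segments, build the
-- dict from the segments); same O(n) cost, a genuinely different decomposition ("alternative").

-- ===== PORT A =====
-- A-side helper: one iteration of A's for-loop (flush on a qmd:// boundary, then conditional append)
def pvStepA (st : PySem.Dict String String × List String) (line : String) :
    PySem.Dict String String × List String :=
  let st1 :=
    if PySem.Str.startswith line "qmd://" = true ∧ st.2 ≠ [] then
      -- current[0] : the guard guarantees current ≠ [], so headD "" is Python's current[0]
      (PySem.Dict.insert st.1 (PySem.Str.strip (st.2.headD ""))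
        (PySem.Str.strip (PySem.Str.join "\n" st.2)), ([] : List String))
    else st
  if PySem.Str.strip line ≠ "" ∨ st1.2 ≠ [] then (st1.1, st1.2 ++ [line]) else st1

-- A-side helper: the trailing 'if current:' flush
def pvFinishA (st : PySem.Dict String String × List String) : PySem.Dict String String :=
  if st.2 ≠ [] then
    PySem.Dict.insert st.1 (PySem.Str.strip (st.2.headD ""))
      (PySem.Str.strip (PySem.Str.join "\n" st.2))
  else st.1

def parse_raw_blocks (raw_memory : String) : List (String × String) :=
  (pvFinishA ((PySem.Str.splitlines raw_memory).foldl pvStepA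
    ((PySem.Dict.empty : PySem.Dict String String), ([] : List String)))).items

-- ===== PORT B =====
-- B-side helper: insert one segment into the dict (the body of B's dict comprehension);
-- every segment is nonempty (consecutive boundary indices are strictly increasing), so headD "" is seg[0]
def pvInsB (d : PySem.Dict String String) (seg : List String) : PySem.Dict String String :=
  PySem.Dict.insert d (PySem.Str.strip (seg.headD ""))
    (PySem.Str.strip (PySem.Str.join "\n" seg))

def parse_raw_blocks_alt (raw_memory : String) : List (String × String) :=
  let lines := PySem.Str.splitlines raw_memory
  match (PySem.List.enumerate lines 0).find? (fun p => !(PySem.Str.strip p.2 == "")) with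
  | none => []
  | some st =>
    let start : Int := st.1
    let n : Int := (lines.length : Int)
    let bounds : List Int :=
      start :: ((PySem.List.pyRange (start + 1) n 1).filter
        (fun j => PySem.Str.startswith (PySem.List.pyGetD lines j "") "qmd://")) ++ [n]
    let segments := (bounds.zip bounds.tail).map
      (fun ab => PySem.List.slice lines (some ab.1) (some ab.2))
    (segments.foldl pvInsB (PySem.Dict.empty : PySem.Dict String String)).items

-- ===== PRECONDITION & SPEC =====
def Spec_parse_raw_blocks (raw_memory : String) (out : List (String × String)) : Prop := out = parse_raw_blocks_alt raw_memory
instance (raw_memory : String) (out : List (String × String)) : Decidable (Spec_parse_raw_blocks raw_memory out) := by unfold Spec_parse_raw_blocks; infer_instance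

-- ===== CLAIM (what is proved, stated in full; the proofs are below) =====
def Claim_equal_parse_raw_blocks : Prop := ∀ (raw_memory : String), Dom_parse_raw_blocks raw_memory → Spec_parse_raw_blocks raw_memory (parse_raw_blocks raw_memory)

-- ===== LEMMAS AND PROOFS =====

def segsFrom (cur : List String) : List String → List (List String)
  | [] => [cur]
  | l :: ls =>
    if PySem.Str.startswith l "qmd://" = true then cur :: segsFrom [l] ls
    else segsFrom (cur ++ [l]) ls

theorem strip_nil_all_space {cs : List Char} (h : PySem.Chars.strip cs = []) :
    ∀ c ∈ cs, PySem.Chars.isspace c = true := by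
  unfold PySem.Chars.strip PySem.Chars.rstrip PySem.Chars.lstrip at h
  have h1 : List.dropWhile PySem.Chars.isspace (List.dropWhile PySem.Chars.isspace cs).reverse = [] := by
    simpa using congrArg List.reverse h
  have h2 : ∀ c ∈ List.dropWhile PySem.Chars.isspace cs, PySem.Chars.isspace c = true := by
    intro c hc
    exact List.dropWhile_eq_nil_iff.mp h1 c (List.mem_reverse.mpr hc)
  intro c hc
  rw [← List.takeWhile_append_dropWhile (p := PySem.Chars.isspace) (l := cs)] at hc
  rcases List.mem_append.mp hc with h3 | h3
  · exact List.mem_takeWhile_imp h3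
  · exact h2 c h3
theorem qmd_strip_ne {l : String} (h : PySem.Str.startswith l "qmd://" = true) :
    PySem.Str.strip l ≠ "" := by
  intro hc
  have hq : ('q' : Char) ∈ l.toList := by
    rw [PySem.Str.startswith_eq, PySem.Chars.startswith_iff] at h
    rcases h with ⟨tl, htl⟩
    rw [← htl]; simp
  have hnil : PySem.Chars.strip l.toList = [] := by
    have := congrArg String.toList hc
    rwa [PySem.Str.toList_strip] at this
  have := strip_nil_all_space hnil 'q' hq
  simp [PySem.Chars.isspace] at this
theorem foldA_blanks {pre : List String} (d : PySem.Dict String String)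
    (h : ∀ l ∈ pre, PySem.Str.strip l = "") :
    pre.foldl pvStepA (d, []) = (d, []) := by
  induction pre with
  | nil => rfl
  | cons l pre ih =>
    have hl := h l (List.mem_cons_self)
    have hstep : pvStepA (d, []) l = (d, []) := by
      simp [pvStepA, hl]
    rw [List.foldl_cons, hstep]
    exact ih (fun x hx => h x (List.mem_cons_of_mem _ hx))
theorem foldA_segs : ∀ (ls : List String) (d : PySem.Dict String String) (cur : List String),
    cur ≠ [] →
    pvFinishA (ls.foldl pvStepA (d, cur)) = (segsFrom cur ls).foldl pvInsB d := by
  intro ls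
  induction ls with
  | nil =>
    intro d cur hcur
    simp [pvFinishA, segsFrom, pvInsB, hcur]
  | cons l ls ih =>
    intro d cur hcur
    by_cases hq : PySem.Str.startswith l "qmd://" = true
    · have hq' : PySem.Chars.startswith l.toList ['q','m','d',':','/','/'] = true := by
        simpa [PySem.Str.startswith_eq] using hq
      have hstep : pvStepA (d, cur) l = (pvInsB d cur, [l]) := by
        simp [pvStepA, hq', hcur, pvInsB, qmd_strip_ne hq]
      rw [List.foldl_cons, hstep, ih _ [l] (by simp)]
      simp [segsFrom, hq']
    · have hq' : PySem.Chars.startswith l.toList ['q','m','d',':','/','/'] = false := by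
        simpa [PySem.Str.startswith_eq] using hq
      have hstep : pvStepA (d, cur) l = (d, cur ++ [l]) := by
        simp [pvStepA, hq', hcur]
      rw [List.foldl_cons, hstep, ih _ _ (by simp)]
      simp [segsFrom, hq']
theorem segsFrom_no_qmd : ∀ {ls : List String} (cur : List String),
    (∀ l ∈ ls, PySem.Str.startswith l "qmd://" = false) →
    segsFrom cur ls = [cur ++ ls] := by
  intro ls
  induction ls with
  | nil => intro cur _; simp [segsFrom]
  | cons l ls ih =>
    intro cur h
    rw [segsFrom, if_neg (by simp [← PySem.Str.startswith_eq, h l List.mem_cons_self]),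
      ih _ (fun x hx => h x (List.mem_cons_of_mem _ hx))]
    simp
theorem segsFrom_append_no_qmd : ∀ {u : List String} (cur : List String) (ls : List String),
    (∀ l ∈ u, PySem.Str.startswith l "qmd://" = false) →
    segsFrom cur (u ++ ls) = segsFrom (cur ++ u) ls := by
  intro u
  induction u with
  | nil => intro cur ls _; simp
  | cons x u ih =>
    intro cur ls h
    rw [List.cons_append, segsFrom, if_neg (by simp [← PySem.Str.startswith_eq, h x List.mem_cons_self]),
      ih _ _ (fun y hy => h y (List.mem_cons_of_mem _ hy))]
    simp
theorem getD_mem_suffix {α : Type} (A B : List α) (m : Nat) (d : α)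
    (h1 : A.length ≤ m) (h2 : m < (A ++ B).length) : (A ++ B).getD m d ∈ B := by
  have hlt : m - A.length < B.length := by simp at h2; omega
  rw [List.getD_eq_getElem?_getD, List.getElem?_append_right h1, List.getElem?_eq_getElem hlt]
  exact List.getElem_mem hlt

theorem getD_mem_middle {α : Type} (A u B : List α) (m : Nat) (d : α)
    (h1 : A.length ≤ m) (h2 : m < A.length + u.length) : (A ++ u ++ B).getD m d ∈ u := by
  rw [List.append_assoc]
  have hlt : m - A.length < u.length := by omega
  rw [List.getD_eq_getElem?_getD, List.getElem?_append_right h1,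
    List.getElem?_append_left hlt, List.getElem?_eq_getElem hlt]
  exact List.getElem_mem hlt

theorem getD_append_self {α : Type} (A : List α) (q : α) (B : List α) (d : α) :
    (A ++ q :: B).getD A.length d = q := by
  rw [List.getD_eq_getElem?_getD, List.getElem?_append_right (le_refl A.length)]
  simp
def pvBounds (lines : List String) (s : Int) : List Int :=
  s :: ((PySem.List.pyRange (s + 1) ((lines.length : Int)) 1).filter
    (fun j => PySem.Str.startswith (PySem.List.pyGetD lines j "") "qmd://")) ++ [(lines.length : Int)]
theorem slices_eq : ∀ (N : Nat) (t pre lines : List String) (h : String) (rest : List String),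
    t.length ≤ N → lines = pre ++ t → t = h :: rest →
    ((pvBounds lines (pre.length : Int)).zip (pvBounds lines (pre.length : Int)).tail).map
      (fun ab => PySem.List.slice lines (some ab.1) (some ab.2)) = segsFrom [h] rest := by
  intro N
  induction N with
  | zero => intro t pre lines h rest hN _ ht; subst ht; simp at hN
  | succ N ih =>
    intro t pre lines h rest hN hlines ht
    subst ht; subst hlines
    simp only [pvBounds]
    by_cases hex : ∀ l ∈ rest, PySem.Str.startswith l "qmd://" = false
    · -- no boundary: a single segment
      have hF : (PySem.List.pyRange ((pre.length : Int) + 1) (((pre ++ h :: rest).length : Int)) 1).filter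
          (fun j => PySem.Str.startswith (PySem.List.pyGetD (pre ++ h :: rest) j "") "qmd://") = [] := by
        rw [List.filter_eq_nil_iff]
        intro j hj
        rw [PySem.List.mem_pyRange_one] at hj
        have hnn : j = ((j.toNat : Nat) : Int) := by omega
        rw [hnn, PySem.List.pyGetD_natCast]
        have hmem : (pre ++ h :: rest).getD j.toNat "" ∈ rest := by
          have heq : (pre ++ h :: rest) = (pre ++ [h]) ++ rest := by simp
          rw [heq]
          apply getD_mem_suffix
          · simp; omega
          · simp at hj ⊢; omega
        have hstr := hex _ hmem
        simpa [PySem.Str.startswith_eq, List.getD_eq_getElem?_getD] using hstr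
      rw [hF]
      have hslice : PySem.List.slice (pre ++ h :: rest) (some (pre.length : Int))
          (some (((pre ++ h :: rest).length : Int))) = h :: rest := by
        rw [PySem.List.slice_natCast, List.drop_left]
        apply List.take_of_length_le
        simp
      have hzip : (([((pre.length : Int))] ++ [(((pre ++ h :: rest).length : Int))]).zip
          (([((pre.length : Int))] ++ [(((pre ++ h :: rest).length : Int))]).tail))
          = [(((pre.length : Int)), (((pre ++ h :: rest).length : Int)))] := rfl
      rw [hzip, List.map_cons, List.map_nil, hslice, segsFrom_no_qmd _ hex]
      rfl
    · -- there is a first boundary q after the (qmd-free) prefix u of rest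
      push Not at hex
      obtain ⟨u, q, v, hu, hq, hrest⟩ :
          ∃ u q v, (∀ l ∈ u, PySem.Str.startswith l "qmd://" = false) ∧
            PySem.Str.startswith q "qmd://" = true ∧ rest = u ++ q :: v := by
        obtain ⟨l0, hl0mem, hl0⟩ := hex
        rw [Bool.ne_false_iff] at hl0
        have hdr : rest.dropWhile (fun l => !(PySem.Str.startswith l "qmd://")) ≠ [] := by
          intro h0
          rw [List.dropWhile_eq_nil_iff] at h0
          have h1 := h0 l0 hl0mem
          rw [hl0] at h1
          simp at h1
        obtain ⟨q, v, hqv⟩ := List.exists_cons_of_ne_nil hdr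
        refine ⟨rest.takeWhile (fun l => !(PySem.Str.startswith l "qmd://")), q, v, ?_, ?_, ?_⟩
        · intro l hl
          have := List.mem_takeWhile_imp hl
          simpa using this
        · have h1 := List.head_dropWhile_not (fun l => !(PySem.Str.startswith l "qmd://")) hdr
          have h2 : (rest.dropWhile (fun l => !(PySem.Str.startswith l "qmd://"))).head? = some q := by
            rw [hqv]
            rfl
          have h3 := List.head?_eq_some_head hdr
          have h4 : (rest.dropWhile (fun l => !(PySem.Str.startswith l "qmd://"))).head hdr = q := by
            rw [h3] at h2
            exact Option.some.inj h2
          rw [h4] at h1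
          simpa using h1
        · conv_lhs => rw [← List.takeWhile_append_dropWhile
            (p := fun l => !(PySem.Str.startswith l "qmd://")) (l := rest)]
          rw [hqv]
      subst hrest
      have hlen : (pre ++ h :: (u ++ q :: v)).length = pre.length + 1 + u.length + 1 + v.length := by
        simp; omega
      have hreassoc : (pre ++ h :: (u ++ q :: v)) = (pre ++ h :: u) ++ q :: v := by simp
      have hk : (pre ++ h :: u).length = pre.length + 1 + u.length := by simp; omega
      have hsplit : PySem.List.pyRange ((pre.length : Int) + 1) (((pre ++ h :: (u ++ q :: v)).length : Int)) 1
          = PySem.List.pyRange ((pre.length : Int) + 1) (((pre ++ h :: u).length : Int)) 1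
            ++ PySem.List.pyRange (((pre ++ h :: u).length : Int)) (((pre ++ h :: (u ++ q :: v)).length : Int)) 1 := by
        apply PySem.List.pyRange_one_append
        · rw [hk]; push_cast; omega
        · rw [hk, hlen]; push_cast; omega
      rw [hsplit, List.filter_append]
      have hF1 : (PySem.List.pyRange ((pre.length : Int) + 1) (((pre ++ h :: u).length : Int)) 1).filter
          (fun j => PySem.Str.startswith (PySem.List.pyGetD (pre ++ h :: (u ++ q :: v)) j "") "qmd://") = [] := by
        rw [List.filter_eq_nil_iff]
        intro j hj
        rw [PySem.List.mem_pyRange_one] at hj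
        have hnn : j = ((j.toNat : Nat) : Int) := by omega
        rw [hnn, PySem.List.pyGetD_natCast]
        have hmem : (pre ++ h :: (u ++ q :: v)).getD j.toNat "" ∈ u := by
          have heq : (pre ++ h :: (u ++ q :: v)) = (pre ++ [h]) ++ u ++ (q :: v) := by simp
          rw [heq]
          apply getD_mem_middle
          · simp; omega
          · rw [hk] at hj; simp at hj ⊢; omega
        have hstr := hu _ hmem
        simpa [PySem.Str.startswith_eq, List.getD_eq_getElem?_getD] using hstr
      rw [hF1, List.nil_append]
      have hcons : PySem.List.pyRange (((pre ++ h :: u).length : Int)) (((pre ++ h :: (u ++ q :: v)).length : Int)) 1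
          = ((pre ++ h :: u).length : Int) :: PySem.List.pyRange (((pre ++ h :: u).length : Int) + 1) (((pre ++ h :: (u ++ q :: v)).length : Int)) 1 := by
        apply PySem.List.pyRange_one_cons
        rw [hk, hlen]; push_cast; omega
      rw [hcons, List.filter_cons]
      have hpredk : (PySem.Str.startswith (PySem.List.pyGetD (pre ++ h :: (u ++ q :: v)) (((pre ++ h :: u).length : Int)) "") "qmd://") = true := by
        rw [PySem.List.pyGetD_natCast, hreassoc, getD_append_self]
        exact hq
      rw [if_pos (by simpa using hpredk)]
      have hslice1 : PySem.List.slice (pre ++ h :: (u ++ q :: v)) (some (pre.length : Int))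
          (some (((pre ++ h :: u).length : Int))) = h :: u := by
        rw [PySem.List.slice_natCast, List.drop_left, hk]
        have hlen2 : pre.length + 1 + u.length - pre.length = (h :: u).length := by simp; omega
        rw [hlen2, ← List.cons_append, List.take_left]
      have hIH := ih (q :: v) (pre ++ h :: u) (pre ++ h :: (u ++ q :: v)) q v
        (by simp at hN ⊢; omega) hreassoc rfl
      simp only [pvBounds] at hIH
      simp only [List.cons_append, List.tail_cons, List.zip_cons_cons, List.map_cons] at hIH ⊢
      rw [hslice1]
      rw [hIH]
      rw [segsFrom_append_no_qmd _ _ hu]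
      rw [segsFrom, if_pos hq]
      rfl
theorem find_none {lines : List String} (h : ∀ l ∈ lines, PySem.Str.strip l = "") :
    (PySem.List.enumerate lines 0).find? (fun p => !(PySem.Str.strip p.2 == "")) = none := by
  rw [List.find?_eq_none]
  intro p hp
  rw [PySem.List.mem_enumerate_iff] at hp
  rcases hp with ⟨k, hk, rfl⟩
  simp [h _ (List.getElem_mem hk)]
theorem find_start {pre : List String} {h : String} {rest : List String}
    (hpre : ∀ l ∈ pre, PySem.Str.strip l = "") (hh : PySem.Str.strip h ≠ "") :
    (PySem.List.enumerate (pre ++ h :: rest) 0).find? (fun p => !(PySem.Str.strip p.2 == ""))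
      = some ((pre.length : Int), h) := by
  rw [PySem.List.enumerate_append, List.find?_append, find_none hpre]
  rw [Option.none_or, PySem.List.enumerate_cons, List.find?_cons_of_pos (by simp [hh])]
  simp

theorem parse_raw_blocks_spec : Claim_equal_parse_raw_blocks := by
  intro raw _
  unfold Spec_parse_raw_blocks
  have hsplit : PySem.Str.splitlines raw
      = (PySem.Str.splitlines raw).takeWhile (fun l => PySem.Str.strip l == "")
        ++ (PySem.Str.splitlines raw).dropWhile (fun l => PySem.Str.strip l == "") :=
    (List.takeWhile_append_dropWhile).symm
  have hpre : ∀ l ∈ (PySem.Str.splitlines raw).takeWhile (fun l => PySem.Str.strip l == ""),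
      PySem.Str.strip l = "" := by
    intro l hl
    have := List.mem_takeWhile_imp hl
    simpa using this
  cases ht : (PySem.Str.splitlines raw).dropWhile (fun l => PySem.Str.strip l == "") with
  | nil =>
    have hall : ∀ l ∈ PySem.Str.splitlines raw, PySem.Str.strip l = "" := by
      intro l hl
      rw [hsplit, ht, List.append_nil] at hl
      exact hpre l hl
    have hA : parse_raw_blocks raw = [] := by
      unfold parse_raw_blocks
      rw [foldA_blanks _ hall]
      rfl
    have hB : parse_raw_blocks_alt raw = [] := by
      simp only [parse_raw_blocks_alt]
      rw [find_none hall]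
    rw [hA, hB]
  | cons h rest =>
    have hdr : (PySem.Str.splitlines raw).dropWhile (fun l => PySem.Str.strip l == "") ≠ [] := by
      rw [ht]; exact List.cons_ne_nil _ _
    have hh : PySem.Str.strip h ≠ "" := by
      have h1 := List.head_dropWhile_not (fun l => PySem.Str.strip l == "") hdr
      have h2 : ((PySem.Str.splitlines raw).dropWhile (fun l => PySem.Str.strip l == "")).head? = some h := by
        rw [ht]; rfl
      have h3 := List.head?_eq_some_head hdr
      have h4 : ((PySem.Str.splitlines raw).dropWhile (fun l => PySem.Str.strip l == "")).head hdr = h := by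
        rw [h3] at h2
        exact Option.some.inj h2
      rw [h4] at h1
      simpa using h1
    rw [ht] at hsplit
    set pre := (PySem.Str.splitlines raw).takeWhile (fun l => PySem.Str.strip l == "") with hpre_def
    -- A's loop: skip the blank prefix, then it inserts exactly the segments
    have hA : parse_raw_blocks raw
        = ((segsFrom [h] rest).foldl pvInsB PySem.Dict.empty).items := by
      unfold parse_raw_blocks
      rw [hsplit, List.foldl_append, foldA_blanks _ hpre]
      have hstep : pvStepA (PySem.Dict.empty, []) h = (PySem.Dict.empty, [h]) := by
        simp [pvStepA, hh]
      rw [List.foldl_cons, hstep, foldA_segs rest _ [h] (List.cons_ne_nil _ _)]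
    -- B: the found start is the blank prefix's length, and the slices are the segments
    have hB : parse_raw_blocks_alt raw
        = ((segsFrom [h] rest).foldl pvInsB PySem.Dict.empty).items := by
      simp only [parse_raw_blocks_alt]
      rw [hsplit, find_start hpre hh]
      have hseg := slices_eq (h :: rest).length (h :: rest) pre (pre ++ h :: rest) h rest
        le_rfl rfl rfl
      simp only [pvBounds] at hseg
      exact congrArg (fun segs => (List.foldl pvInsB PySem.Dict.empty segs).items) hseg
    rw [hA, hB]
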